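-- pv_equiv track=rewrite | github.com/NoisimRo/APP-AI | backend/app/services/document_processor.py | get_text_stats
-- ===== SOURCE A (Python) =====
-- def get_text_stats(text: str) -> dict:
--     """Get statistics about extracted text.
--
--     Args:
--         text: Extracted text
--
--     Returns:
--         Dictionary with text statistics
--     """
--     lines = text.split('\n')
--     words = text.split()
--
--     return {
--         "characters": len(text),
--         "words": len(words),
--         "lines": len(lines),
--         "paragraphs": len([l for l in lines if l.strip()])
--     }
-- ===== SOURCE B (Python) =====
-- def get_text_stats(text: str) -> dict:
--     """Get statistics about extracted text in one pass over the characters."""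
--     words = 0
--     lines = 1
--     paragraphs = 0
--     in_word = False
--     line_has_content = False
--     for ch in text:
--         if ch == '\n':
--             lines += 1
--             if line_has_content:
--                 paragraphs += 1
--             line_has_content = False
--             in_word = False
--         elif ch.isspace():
--             in_word = False
--         else:
--             if not in_word:
--                 words += 1
--                 in_word = True
--             line_has_content = True
--     if line_has_content:
--         paragraphs += 1
--     return {
--         "characters": len(text),
--         "words": words,
--         "lines": lines,
--         "paragraphs": paragraphs,
--     }
-- ===== Notes on version B (the rewrite author's own statement) =====
-- stated objective: alternative
-- what changed: Replaces the two splits and the strip-filter comprehension (which materialize the word and line lists) by a single character loop maintaining word/line/paragraph counters with in_word and line_has_content flags.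
import Mathlib
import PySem

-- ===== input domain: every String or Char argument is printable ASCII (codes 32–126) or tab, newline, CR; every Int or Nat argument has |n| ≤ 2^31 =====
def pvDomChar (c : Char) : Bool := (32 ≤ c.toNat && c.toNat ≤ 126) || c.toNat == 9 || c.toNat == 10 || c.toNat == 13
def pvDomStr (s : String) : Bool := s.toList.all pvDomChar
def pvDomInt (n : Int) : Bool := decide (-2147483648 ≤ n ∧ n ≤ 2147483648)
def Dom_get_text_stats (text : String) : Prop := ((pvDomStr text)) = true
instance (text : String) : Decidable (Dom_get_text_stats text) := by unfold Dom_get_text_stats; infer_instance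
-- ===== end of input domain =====

-- B replaces A's two splits and strip-filter by a single counting pass over the characters (alternative decomposition, same cost).

-- ===== PORT A =====
def get_text_stats (text : String) : List (String × Int) :=
  let lines := (PySem.Str.split? text "\n").getD []
  let words := PySem.Str.split₀ text
  [("characters", PySem.Str.len text),
   ("words", (words.length : Int)),
   ("lines", (lines.length : Int)),
   ("paragraphs", ((lines.filter (fun l => !(PySem.Str.strip l == ""))).length : Int))]

-- ===== PORT B =====
-- the for-loop of Source B, state (words, lines, paragraphs, in_word, line_has_content)
def pvLoop : List Char → Int → Int → Int → Bool → Bool → Int × Int × Int × Bool × Bool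
  | [], words, lines, paragraphs, inw, lhc => (words, lines, paragraphs, inw, lhc)
  | c :: rest, words, lines, paragraphs, inw, lhc =>
    if c = '\n' then
      pvLoop rest words (lines + 1) (paragraphs + (if lhc then 1 else 0)) false false
    else if PySem.Chars.isspace c then
      pvLoop rest words lines paragraphs false lhc
    else
      pvLoop rest (words + (if inw then 0 else 1)) lines paragraphs true true

def get_text_stats_alt (text : String) : List (String × Int) :=
  let st := pvLoop text.toList 0 1 0 false false
  [("characters", PySem.Str.len text),
   ("words", st.1),
   ("lines", st.2.1),
   ("paragraphs", st.2.2.1 + (if st.2.2.2.2 then 1 else 0))]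

-- ===== PRECONDITION & SPEC =====
def Spec_get_text_stats (text : String) (out : List (String × Int)) : Prop := out = get_text_stats_alt text
instance (text : String) (out : List (String × Int)) : Decidable (Spec_get_text_stats text out) := by unfold Spec_get_text_stats; infer_instance

-- ===== CLAIM (what is proved, stated in full; the proofs are below) =====
def Claim_equal_get_text_stats : Prop := ∀ (text : String), Dom_get_text_stats text → Spec_get_text_stats text (get_text_stats text)

-- ===== LEMMAS AND PROOFS =====

-- word count of rest given the in_word flag, counting each word at its first character (B's rule)
def pvW : List Char → Bool → Nat
  | [], _ => 0
  | c :: r, inw =>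
    if PySem.Chars.isspace c then pvW r false
    else (if inw then 0 else 1) + pvW r true

-- paragraph count of rest given the line_has_content flag, including the final-line finalize (B's rule)
def pvP : List Char → Bool → Nat
  | [], lhc => if lhc then 1 else 0
  | c :: r, lhc =>
    if c = '\n' then (if lhc then 1 else 0) + pvP r false
    else if PySem.Chars.isspace c then pvP r lhc
    else pvP r true

theorem pvLoop_words (s : List Char) : ∀ (w l p : Int) (inw lhc : Bool),
    (pvLoop s w l p inw lhc).1 = w + pvW s inw := by
  induction s with
  | nil => intro w l p inw lhc; simp [pvLoop, pvW]
  | cons c r ih =>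
    intro w l p inw lhc
    by_cases hn : c = '\n'
    · subst hn
      have hsp : PySem.Chars.isspace '\n' = true := by decide
      simp [pvLoop, pvW, hsp, ih]
    · by_cases hs : PySem.Chars.isspace c = true
      · simp [pvLoop, pvW, hn, hs, ih]
      · simp [pvLoop, pvW, hn, hs, ih]; cases inw <;> simp <;> ring

theorem pvLoop_lines (s : List Char) : ∀ (w l p : Int) (inw lhc : Bool),
    (pvLoop s w l p inw lhc).2.1 = l + s.count '\n' := by
  induction s with
  | nil => intro w l p inw lhc; simp [pvLoop]
  | cons c r ih =>
    intro w l p inw lhc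
    by_cases hn : c = '\n'
    · subst hn; simp [pvLoop, ih, List.count_cons]; ring
    · by_cases hs : PySem.Chars.isspace c = true
      · simp [pvLoop, hn, hs, ih, List.count_cons]
      · simp [pvLoop, hn, hs, ih, List.count_cons]

theorem pvLoop_paras (s : List Char) : ∀ (w l p : Int) (inw lhc : Bool),
    (pvLoop s w l p inw lhc).2.2.1 + (if (pvLoop s w l p inw lhc).2.2.2.2 then 1 else 0)
      = p + pvP s lhc := by
  induction s with
  | nil => intro w l p inw lhc; simp [pvLoop, pvP]
  | cons c r ih =>
    intro w l p inw lhc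
    by_cases hn : c = '\n'
    · subst hn; simp [pvLoop, pvP, ih]; cases lhc <;> simp <;> ring
    · by_cases hs : PySem.Chars.isspace c = true
      · simp [pvLoop, pvP, hn, hs, ih]
      · simp [pvLoop, pvP, hn, hs, ih]

-- A's split₀.go produces acc.length + pvW s (pending) + (pending piece) pieces
theorem pvSplit0_go_length (s : List Char) : ∀ (cur : List Char) (acc : List (List Char)),
    (PySem.Chars.split₀.go s cur acc).length
      = acc.length + pvW s (!cur.isEmpty) + (if cur.isEmpty then 0 else 1) := by
  induction s with
  | nil => intro cur acc; cases cur <;> simp [PySem.Chars.split₀.go, pvW]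
  | cons c r ih =>
    intro cur acc
    by_cases hs : PySem.Chars.isspace c = true
    · cases cur <;> simp [PySem.Chars.split₀.go, hs, pvW, ih] <;> omega
    · cases cur <;> simp [PySem.Chars.split₀.go, hs, pvW, ih] <;> omega

theorem pvWords_eq (s : List Char) :
    ((PySem.Chars.split₀ s).length : Int) = (pvLoop s 0 1 0 false false).1 := by
  rw [pvLoop_words]
  simp [PySem.Chars.split₀, pvSplit0_go_length]

-- line count: splitOn.go on sep = ['\n'] yields acc.length + 1 + (count of '\n' in l) pieces
theorem pvSplitOn_go_length (fuel : Nat) : ∀ (l cur : List Char) (acc : List (List Char)),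
    l.length ≤ fuel →
    (PySem.Chars.splitOn.go ['\n'] fuel l cur acc).length
      = acc.length + 1 + l.count '\n' := by
  induction fuel with
  | zero =>
    intro l cur acc h
    have : l = [] := List.eq_nil_of_length_eq_zero (Nat.le_zero.mp h)
    subst this; simp [PySem.Chars.splitOn.go]
  | succ n ih =>
    intro l cur acc h
    cases l with
    | nil => simp [PySem.Chars.splitOn.go]
    | cons c rest =>
      have h' : rest.length ≤ n := by simpa using Nat.le_of_succ_le_succ h
      by_cases hc : c = '\n'
      · subst hc
        simp [PySem.Chars.splitOn.go, List.isPrefixOf, ih rest [] _ h', List.count_cons]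
        omega
      · simp [PySem.Chars.splitOn.go, List.isPrefixOf, Ne.symm hc, hc,
              ih rest (c :: cur) acc h', List.count_cons]

theorem pvLines_eq (s : List Char) :
    (((PySem.Chars.splitOn s ['\n']).length : Int)) = (pvLoop s 0 1 0 false false).2.1 := by
  rw [pvLoop_lines]
  simp [PySem.Chars.splitOn, pvSplitOn_go_length (s.length + 1) s [] [] (by omega)]

theorem pvStrip_empty_iff (s : List Char) :
    (PySem.Chars.strip s = []) ↔ ∀ c ∈ s, PySem.Chars.isspace c = true := by
  unfold PySem.Chars.strip PySem.Chars.rstrip PySem.Chars.lstrip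
  simp [List.dropWhile_eq_nil_iff]
  constructor
  · intro h c hc
    rcases List.mem_append.mp ((List.takeWhile_append_dropWhile (p := PySem.Chars.isspace) (l := s)) ▸ hc) with h1 | h2
    · exact List.mem_takeWhile_imp h1
    · exact h c h2
  · intro h c hc
    exact h c ((List.dropWhile_sublist _).subset hc)

-- a segment survives A's strip-filter iff it has a non-whitespace character
theorem pvHasContent (x : List Char) :
    (!(PySem.Chars.strip x).isEmpty) = x.any (fun c => !PySem.Chars.isspace c) := by
  have h := pvStrip_empty_iff x
  cases hx : x.any (fun c => !PySem.Chars.isspace c) with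
  | false =>
    have hall : ∀ c ∈ x, PySem.Chars.isspace c = true := by
      intro c hc
      have := List.any_eq_false.mp hx c hc
      simpa using this
    simp [h.mpr hall]
  | true =>
    have hne : PySem.Chars.strip x ≠ [] := by
      intro he
      obtain ⟨c, hc, hcp⟩ := List.any_eq_true.mp hx
      have := h.mp he c hc
      simp [this] at hcp
    simp [List.isEmpty_iff, hne]

theorem pvFinalSeg (cur : List Char) (acc : List (List Char)) :
    (((cur.reverse :: acc).reverse).filter (fun seg => !(PySem.Chars.strip seg).isEmpty)).length
      = (acc.filter (fun seg => !(PySem.Chars.strip seg).isEmpty)).length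
        + (if cur.any (fun c => !PySem.Chars.isspace c) then 1 else 0) := by
  rw [List.filter_reverse, List.length_reverse, List.filter_cons]
  simp only [pvHasContent, List.any_reverse]
  cases hx : cur.any (fun c => !PySem.Chars.isspace c) <;> simp [hx]

theorem pvOfListBeqEmpty (x : List Char) : (String.ofList x == "") = x.isEmpty := by
  cases hx : x.isEmpty
  · have hne : x ≠ [] := by simpa [List.isEmpty_iff] using hx
    have : String.ofList x ≠ "" := fun h => hne (by simpa using congrArg String.toList h)
    simp [this]
  · have : x = [] := List.isEmpty_iff.mp hx
    subst this; decide

theorem pvSplitOn_go_filter (fuel : Nat) : ∀ (l cur : List Char) (acc : List (List Char)),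
    l.length ≤ fuel →
    ((PySem.Chars.splitOn.go ['\n'] fuel l cur acc).filter
        (fun seg => !(PySem.Chars.strip seg).isEmpty)).length
      = (acc.filter (fun seg => !(PySem.Chars.strip seg).isEmpty)).length
        + pvP l (cur.any (fun c => !PySem.Chars.isspace c)) := by
  induction fuel with
  | zero =>
    intro l cur acc h
    have : l = [] := List.eq_nil_of_length_eq_zero (Nat.le_zero.mp h)
    subst this
    show ((((cur.reverse ++ []) :: acc).reverse).filter _).length = _
    rw [List.append_nil, pvFinalSeg]
    simp [pvP]
  | succ n ih =>
    intro l cur acc h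
    cases l with
    | nil =>
      show (((cur.reverse :: acc).reverse).filter _).length = _
      rw [pvFinalSeg]
      simp [pvP]
    | cons c rest =>
      have h' : rest.length ≤ n := by simpa using Nat.le_of_succ_le_succ h
      by_cases hc : c = '\n'
      · subst hc
        rw [show PySem.Chars.splitOn.go ['\n'] (n+1) ('\n' :: rest) cur acc
              = PySem.Chars.splitOn.go ['\n'] n rest [] (cur.reverse :: acc) by
            simp [PySem.Chars.splitOn.go, List.isPrefixOf]]
        rw [ih rest [] _ h', List.filter_cons]
        simp only [pvHasContent, List.any_reverse, pvP]
        cases hx : cur.any (fun c => !PySem.Chars.isspace c) <;> simp [hx] <;> omega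
      · rw [show PySem.Chars.splitOn.go ['\n'] (n+1) (c :: rest) cur acc
              = PySem.Chars.splitOn.go ['\n'] n rest (c :: cur) acc by
            simp [PySem.Chars.splitOn.go, List.isPrefixOf, Ne.symm hc]]
        rw [ih rest (c :: cur) acc h']
        by_cases hs : PySem.Chars.isspace c = true
        · simp [pvP, hc, hs]
        · simp [pvP, hc, hs]

theorem pvParas_eq (s : List Char) :
    (((PySem.Chars.splitOn s ['\n']).filter (fun l => !(PySem.Chars.strip l).isEmpty)).length : Int)
      = (pvLoop s 0 1 0 false false).2.2.1 + (if (pvLoop s 0 1 0 false false).2.2.2.2 then 1 else 0) := by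
  rw [pvLoop_paras]
  simp [PySem.Chars.splitOn, pvSplitOn_go_filter (s.length + 1) s [] [] (by omega)]

-- ===== VERDICT (by name: the statement is the Claim_ definition above) =====
theorem get_text_stats_spec : Claim_equal_get_text_stats := by
  intro text _
  unfold Spec_get_text_stats get_text_stats get_text_stats_alt
  have hsplit : (PySem.Str.split? text "\n").getD []
      = (PySem.Chars.splitOn text.toList ['\n']).map String.ofList := by
    simp [PySem.Str.split?, PySem.Chars.split?]
  have hwords : ((PySem.Str.split₀ text).length : Int) = (pvLoop text.toList 0 1 0 false false).1 := by
    have h1 : (PySem.Str.split₀ text).length = (PySem.Chars.split₀ text.toList).length := by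
      rw [← PySem.Str.split₀_map_toList, List.length_map]
    rw [← pvWords_eq]
    exact_mod_cast h1
  have hlines : (((PySem.Str.split? text "\n").getD []).length : Int)
      = (pvLoop text.toList 0 1 0 false false).2.1 := by
    rw [hsplit, ← pvLines_eq]; simp
  have hparas : ((((PySem.Str.split? text "\n").getD []).filter
        (fun l => !(PySem.Str.strip l == ""))).length : Int)
      = (pvLoop text.toList 0 1 0 false false).2.2.1
        + (if (pvLoop text.toList 0 1 0 false false).2.2.2.2 then 1 else 0) := by
    rw [hsplit, ← pvParas_eq, List.filter_map, List.length_map]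
    have hfc : ((fun l => !(PySem.Str.strip l == "")) ∘ String.ofList)
        = (fun cs : List Char => !(PySem.Chars.strip cs).isEmpty) := by
      funext cs
      simp [Function.comp, PySem.Str.strip, pvOfListBeqEmpty]
    rw [hfc]
  simp only [hwords, hlines, hparas]
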